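-- pv_equiv track=rewrite | github.com/pthom/hello_imgui | tools/doc/process_md_docs.py | remove_code_blocks
-- ===== SOURCE A (Python) =====
-- def remove_code_blocks(lines):
--     filtered_lines = []
--     in_code_block = False
--     for line in lines:
--         if line.strip().startswith("```"):
--             in_code_block = not in_code_block
--         if not in_code_block:
--             filtered_lines.append(line)
--     return filtered_lines
-- ===== SOURCE B (Python) =====
-- def remove_code_blocks(lines):
--     # pass 1: fence mask; pass 2: running count of fences; pass 3: keep lines with even count
--     fences = [line.strip().startswith("```") for line in lines]
--     counts = []
--     total = 0
--     for f in fences: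
--         total += 1 if f else 0
--         counts.append(total)
--     return [line for line, c in zip(lines, counts) if c % 2 == 0]
-- ===== Notes on version B (the rewrite author's own statement) =====
-- stated objective: alternative
-- what changed: Replaces the mutable in_code_block toggle with a three-pass cumulative-count formulation: a fence mask, its running sum, and a filter keeping lines whose fence count so far is even.
import Mathlib
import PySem

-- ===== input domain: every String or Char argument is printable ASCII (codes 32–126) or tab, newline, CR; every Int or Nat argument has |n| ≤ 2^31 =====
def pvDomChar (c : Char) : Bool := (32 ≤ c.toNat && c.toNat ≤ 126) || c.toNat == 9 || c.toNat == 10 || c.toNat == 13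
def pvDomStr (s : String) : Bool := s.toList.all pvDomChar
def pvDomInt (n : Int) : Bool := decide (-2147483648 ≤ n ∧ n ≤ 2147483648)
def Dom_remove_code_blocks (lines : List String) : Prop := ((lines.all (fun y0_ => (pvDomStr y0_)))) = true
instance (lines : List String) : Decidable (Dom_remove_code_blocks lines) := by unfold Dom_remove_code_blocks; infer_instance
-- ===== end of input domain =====

-- B replaces A's mutable in_code_block toggle by three passes: a fence mask, its running count, and a filter keeping lines whose fence count so far is even (alternative decomposition, same cost).

-- ===== PORT A =====
-- state: (filtered_lines, in_code_block); same toggle-then-check order as the Python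
def remove_code_blocks (lines : List String) : List String :=
  (lines.foldl
    (fun (st : List String × Bool) line =>
      let inb := if PySem.Chars.startswith (PySem.Chars.strip line.toList) ("```".toList) then !st.2 else st.2
      (if inb then st.1 else st.1 ++ [line], inb))
    ([], false)).1

-- ===== PORT B =====
-- pass 1: fence mask; pass 2: running count (state (total, counts)); pass 3: zip-filter-map
def remove_code_blocks_alt (lines : List String) : List String :=
  let fences := lines.map (fun line => PySem.Chars.startswith (PySem.Chars.strip line.toList) ("```".toList))
  let counts := (fences.foldl
      (fun (st : Nat × List Nat) f =>
        let t := st.1 + (if f then 1 else 0)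
        (t, st.2 ++ [t])) (0, [])).2
  ((lines.zip counts).filter (fun p => p.2 % 2 == 0)).map Prod.fst

-- ===== PRECONDITION & SPEC =====
def Spec_remove_code_blocks (lines : List String) (out : List String) : Prop := out = remove_code_blocks_alt lines
instance (lines : List String) (out : List String) : Decidable (Spec_remove_code_blocks lines out) := by unfold Spec_remove_code_blocks; infer_instance

-- ===== CLAIM (what is proved, stated in full; the proofs are below) =====
def Claim_equal_remove_code_blocks : Prop := ∀ (lines : List String), Dom_remove_code_blocks lines → Spec_remove_code_blocks lines (remove_code_blocks lines)

-- ===== LEMMAS AND PROOFS =====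

-- reference recursion: lines kept from state b (in_code_block)
def pvCore (fence : String → Bool) : List String → Bool → List String
  | [], _ => []
  | l :: ls, b =>
    let b' := if fence l then !b else b
    (if b' then [] else [l]) ++ pvCore fence ls b'

-- running count of fences starting from n
def pvCnt : List Bool → Nat → List Nat
  | [], _ => []
  | f :: fs, n =>
    let t := n + (if f then 1 else 0)
    t :: pvCnt fs t

theorem pvA_fold (fence : String → Bool) (ls : List String) (acc : List String) (b : Bool) :
    (ls.foldl
      (fun (st : List String × Bool) line =>
        let inb := if fence line then !st.2 else st.2
        (if inb then st.1 else st.1 ++ [line], inb)) (acc, b)).1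
    = acc ++ pvCore fence ls b := by
  induction ls generalizing acc b with
  | nil => simp [pvCore]
  | cons l ls ih =>
    rw [List.foldl_cons]
    show (List.foldl _
        (if (if fence l then !b else b) then acc else acc ++ [l], if fence l then !b else b) ls).1 = _
    rw [ih]
    simp only [pvCore]
    by_cases h : fence l <;> cases b <;> simp [h]

theorem pvB_fold (fs : List Bool) (acc : List Nat) (n : Nat) :
    (fs.foldl
      (fun (st : Nat × List Nat) f =>
        let t := st.1 + (if f then 1 else 0)
        (t, st.2 ++ [t])) (n, acc)).2
    = acc ++ pvCnt fs n := by
  induction fs generalizing acc n with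
  | nil => simp [pvCnt]
  | cons f fs ih => simp [pvCnt, ih]

theorem pvMain (fence : String → Bool) (ls : List String) (n : Nat) :
    ((ls.zip (pvCnt (ls.map fence) n)).filter (fun p => p.2 % 2 == 0)).map Prod.fst
    = pvCore fence ls (n % 2 == 1) := by
  induction ls generalizing n with
  | nil => simp [pvCnt, pvCore]
  | cons l ls ih =>
    simp only [List.map_cons, pvCnt, pvCore, List.zip_cons_cons, List.filter_cons]
    rcases Nat.mod_two_eq_zero_or_one n with h2 | h2 <;> by_cases h : fence l <;>
      simp [h, h2, Nat.add_mod, ih]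

-- ===== VERDICT (by name: the statement is the Claim_ definition above) =====
theorem remove_code_blocks_spec : Claim_equal_remove_code_blocks := by
  intro lines _
  show remove_code_blocks lines = remove_code_blocks_alt lines
  unfold remove_code_blocks remove_code_blocks_alt
  simp only [pvA_fold, pvB_fold, pvMain, List.nil_append]
  rfl
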